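-- pv_equiv track=rewrite | github.com/MyerFire/Advent-of-Code-2020 | day_6_custom_customs.py | parse_part_one
-- ===== SOURCE A (Python) =====
-- def parse_part_one(group):
--     counts = {}  # this way of doing things gets the amount of times the character appears in the string as well
--     for person in group:
--         for character in person:
--             if not counts.get(character):
--                 counts[character] = 1
--             else:  # if it exists already, then just increment by one; this makes it so that the amount of entries
--                 # in the dict will be the amount of unique characters (the goal), and also gets the count
--                 counts[character] += 1
--     return counts
-- ===== SOURCE B (Python) =====
-- def parse_part_one(group):
--     flat = [character for person in group for character in person]
--     return {character: flat.count(character) for character in dict.fromkeys(flat)}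
-- ===== Notes on version B (the rewrite author's own statement) =====
-- stated objective: idiomatic
-- what changed: Replaces the accumulating dict-update loop (membership test then insert-or-increment per character) with a flatten / dedup-keys / count-per-key comprehension: keys are computed first via dict.fromkeys and each count is a separate flat.count scan.
import Mathlib
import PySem

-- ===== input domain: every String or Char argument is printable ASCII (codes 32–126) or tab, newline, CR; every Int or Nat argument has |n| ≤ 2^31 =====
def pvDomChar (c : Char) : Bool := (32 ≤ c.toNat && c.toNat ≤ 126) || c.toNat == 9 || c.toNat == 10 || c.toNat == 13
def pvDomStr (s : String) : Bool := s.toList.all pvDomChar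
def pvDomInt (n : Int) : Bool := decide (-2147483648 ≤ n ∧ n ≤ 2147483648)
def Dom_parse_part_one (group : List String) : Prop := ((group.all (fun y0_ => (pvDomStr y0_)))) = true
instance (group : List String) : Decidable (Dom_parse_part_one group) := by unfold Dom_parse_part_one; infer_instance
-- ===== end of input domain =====

-- B replaces A's accumulating insert-or-increment dict loop with flatten / dedup keys / one count scan per key (objective: idiomatic; not faster).

-- ===== PORT A =====
-- the body of A's inner loop: `if not counts.get(character): counts[character] = 1 else: counts[character] += 1`
-- (Python's `not counts.get(c)` is true iff the key is absent or maps to 0, i.e. getD c 0 = 0)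
def pvStepA (counts : PySem.Dict String Int) (character : Char) : PySem.Dict String Int :=
  let k := String.ofList [character]
  if counts.getD k 0 = 0 then counts.insert k 1 else counts.modify k 0 (· + 1)

def parse_part_one (group : List String) : List (String × Int) :=
  (group.foldl (fun counts person => person.toList.foldl pvStepA counts)
    PySem.Dict.empty).items

-- ===== PORT B =====
def parse_part_one_alt (group : List String) : List (String × Int) :=
  let flat := group.flatMap (fun person => person.toList)
  (PySem.List.dedup flat).map
    (fun character => (String.ofList [character], (PySem.List.count flat character : Int)))

-- ===== PRECONDITION & SPEC =====
def Spec_parse_part_one (group : List String) (out : List (String × Int)) : Prop := out = parse_part_one_alt group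
instance (group : List String) (out : List (String × Int)) : Decidable (Spec_parse_part_one group out) := by unfold Spec_parse_part_one; infer_instance

-- ===== CLAIM (what is proved, stated in full; the proofs are below) =====
def Claim_equal_parse_part_one : Prop := ∀ (group : List String), Dom_parse_part_one group → Spec_parse_part_one group (parse_part_one group)

-- ===== LEMMAS AND PROOFS =====

theorem pvMkS_injective : Function.Injective (fun c : Char => String.ofList [c]) := by
  intro c d h
  have := congrArg String.toList h
  simpa using this

-- A's loop step, run from a counter state, is Counter's step
theorem pvFoldA_counter (l : List Char) (pre : List String) :
    l.foldl pvStepA (PySem.Dict.counter pre)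
      = PySem.Dict.counter (pre ++ l.map (fun c => String.ofList [c])) := by
  induction l generalizing pre with
  | nil => simp
  | cons c l ih =>
    have hstep : pvStepA (PySem.Dict.counter pre) c
        = PySem.Dict.counter (pre ++ [String.ofList [c]]) := by
      rw [PySem.Dict.counter_append_singleton]
      unfold pvStepA
      by_cases h : (PySem.Dict.counter pre).getD (String.ofList [c]) 0 = 0
      · have hcnt : List.count (String.ofList [c]) pre = 0 := by
          have := PySem.Dict.getD_counter pre (String.ofList [c])
          omega
        have hc : (PySem.Dict.counter pre).contains (String.ofList [c]) = false := by
          rw [PySem.Dict.contains_counter]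
          simpa [List.contains_iff_mem, ← List.count_pos_iff] using hcnt
        rw [if_pos h]
        simp [PySem.Dict.insert, PySem.Dict.modify, hc,
          PySem.Dict.getD_of_not_contains _ 0 hc]
      · rw [if_neg h]
    calc (c :: l).foldl pvStepA (PySem.Dict.counter pre)
        = l.foldl pvStepA (PySem.Dict.counter (pre ++ [String.ofList [c]])) := by
          rw [List.foldl_cons, hstep]
      _ = PySem.Dict.counter ((pre ++ [String.ofList [c]]) ++ l.map (fun c => String.ofList [c])) :=
          ih _
      _ = _ := by simp

theorem pvOfList_map_inj {α β : Type} [BEq α] [LawfulBEq α] [BEq β] [LawfulBEq β]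
    (f : α → β) (hf : Function.Injective f) (l : List α) :
    PySem.Set.ofList (l.map f) = (PySem.Set.ofList l).map f := by
  induction l using List.reverseRecOn with
  | nil => simp
  | append_singleton l x ih =>
    rw [List.map_append, List.map_singleton, PySem.Set.ofList_append_singleton,
      PySem.Set.ofList_append_singleton, PySem.Set.add_eq_ite, PySem.Set.add_eq_ite, ih]
    by_cases h : x ∈ PySem.Set.ofList l
    · rw [if_pos h, if_pos]
      exact List.mem_map.mpr ⟨x, h, rfl⟩
    · have : f x ∉ PySem.Set.ofList (l.map f) := by
        rw [PySem.Set.mem_ofList]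
        intro hm
        rcases List.mem_map.mp hm with ⟨y, hy, hfy⟩
        exact h ((PySem.Set.mem_ofList l x).mpr (hf hfy ▸ hy))
      rw [ih] at this
      simp [h, this]

-- ===== VERDICT (by name: the statement is the Claim_ definition above) =====
theorem parse_part_one_spec : Claim_equal_parse_part_one := by
  intro group _
  unfold Spec_parse_part_one parse_part_one parse_part_one_alt
  dsimp only
  have hflat : group.foldl (fun counts person => person.toList.foldl pvStepA counts)
      PySem.Dict.empty
      = (group.flatMap (fun person => person.toList)).foldl pvStepA PySem.Dict.empty := by
    rw [← List.foldl_map (f := String.toList) (g := fun d l => l.foldl pvStepA d),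
        ← List.foldl_flatten]
    simp [List.flatMap]
  have hcnt : (group.flatMap (fun person => person.toList)).foldl pvStepA PySem.Dict.empty
      = PySem.Dict.counter
          ((group.flatMap (fun person => person.toList)).map (fun c => String.ofList [c])) := by
    simpa using pvFoldA_counter (group.flatMap (fun person => person.toList)) []
  rw [hflat, hcnt, PySem.Dict.items_counter, PySem.List.dedup_eq_ofList,
    pvOfList_map_inj _ pvMkS_injective, List.map_map]
  refine List.map_congr_left (fun c hc => ?_)
  simp [PySem.List.count_eq,
    List.count_map_of_injective _ _ pvMkS_injective c]
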